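-- pv_equiv track=rewrite | github.com/facebookresearch/LaMCTS | LaNAS/one-shot_LaNAS/Evaluate/generator.py | layer_type_encoder
-- ===== SOURCE A (Python) =====
-- def layer_type_encoder(layer_type):
--     encoded_type = []
--     for i in range(len(layer_type)):
--         if layer_type[i] == 'skip_connect':
--             encoded_type.append(0)
--         if layer_type[i] == 'max_pool_3x3':
--             encoded_type.append(1)
--         if layer_type[i] == 'sep_conv_3x3':
--             encoded_type.append(2)
--         if layer_type[i] == 'sep_conv_5x5':
--             encoded_type.append(3)
--
--     return sorted(encoded_type)
-- ===== SOURCE B (Python) =====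
-- def layer_type_encoder(layer_type):
--     c0 = c1 = c2 = c3 = 0
--     for t in layer_type:
--         if t == 'skip_connect':
--             c0 += 1
--         elif t == 'max_pool_3x3':
--             c1 += 1
--         elif t == 'sep_conv_3x3':
--             c2 += 1
--         elif t == 'sep_conv_5x5':
--             c3 += 1
--     return [0] * c0 + [1] * c1 + [2] * c2 + [3] * c3
-- ===== Notes on version B (the rewrite author's own statement) =====
-- stated objective: faster
-- what changed: Counting sort over the fixed 4-code alphabet: one pass keeps four counters and the sorted output is built as concatenated runs of 0,1,2,3, eliminating both the intermediate encoded list and the call to sorted().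
import Mathlib
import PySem

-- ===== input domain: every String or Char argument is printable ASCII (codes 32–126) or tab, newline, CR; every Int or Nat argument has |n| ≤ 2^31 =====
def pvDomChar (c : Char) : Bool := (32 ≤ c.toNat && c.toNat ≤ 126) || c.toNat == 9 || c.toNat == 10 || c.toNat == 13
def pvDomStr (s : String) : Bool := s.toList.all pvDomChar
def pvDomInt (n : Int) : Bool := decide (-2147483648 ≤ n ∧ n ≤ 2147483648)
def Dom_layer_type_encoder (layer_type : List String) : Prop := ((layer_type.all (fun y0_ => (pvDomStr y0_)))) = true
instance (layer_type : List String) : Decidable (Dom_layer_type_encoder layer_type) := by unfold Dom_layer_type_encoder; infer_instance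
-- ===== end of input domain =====

-- B replaces A's map-then-sorted() with a one-pass counting sort over the fixed
-- 4-code alphabet (four counters, output built as concatenated runs of 0,1,2,3).

-- ===== PORT A =====
def layer_type_encoder (layer_type : List String) : List Int :=
  let encoded_type : List Int :=
    (PySem.List.pyRange 0 (PySem.List.len layer_type) 1).foldl
      (fun acc i =>
        let s := PySem.List.pyGetD layer_type i ""
        let acc := if s == "skip_connect" then acc ++ [(0 : Int)] else acc
        let acc := if s == "max_pool_3x3" then acc ++ [1] else acc
        let acc := if s == "sep_conv_3x3" then acc ++ [2] else acc
        let acc := if s == "sep_conv_5x5" then acc ++ [3] else acc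
        acc) []
  PySem.List.sorted encoded_type (fun x => x) false

-- ===== PORT B =====
-- the counters are counts (nonnegative Python ints), held as Nat; '[v] * c' is List.replicate
def layer_type_encoder_alt (layer_type : List String) : List Int :=
  let cs : Nat × Nat × Nat × Nat := layer_type.foldl
    (fun c t =>
      if t == "skip_connect" then (c.1 + 1, c.2.1, c.2.2.1, c.2.2.2)
      else if t == "max_pool_3x3" then (c.1, c.2.1 + 1, c.2.2.1, c.2.2.2)
      else if t == "sep_conv_3x3" then (c.1, c.2.1, c.2.2.1 + 1, c.2.2.2)
      else if t == "sep_conv_5x5" then (c.1, c.2.1, c.2.2.1, c.2.2.2 + 1)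
      else c) (0, 0, 0, 0)
  List.replicate cs.1 (0 : Int) ++ List.replicate cs.2.1 1 ++
    List.replicate cs.2.2.1 2 ++ List.replicate cs.2.2.2 3

-- ===== PRECONDITION & SPEC =====
def Spec_layer_type_encoder (layer_type : List String) (out : List Int) : Prop := out = layer_type_encoder_alt layer_type
instance (layer_type : List String) (out : List Int) : Decidable (Spec_layer_type_encoder layer_type out) := by unfold Spec_layer_type_encoder; infer_instance

-- ===== CLAIM (what is proved, stated in full; the proofs are below) =====
def Claim_equal_layer_type_encoder : Prop := ∀ (layer_type : List String), Dom_layer_type_encoder layer_type → Spec_layer_type_encoder layer_type (layer_type_encoder layer_type)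

-- ===== LEMMAS AND PROOFS =====

-- the four-run sorted shape B produces
def pvRep4 (a b c d : Nat) : List Int :=
  List.replicate a (0 : Int) ++ List.replicate b 1 ++ List.replicate c 2 ++ List.replicate d 3

-- what one element of the input contributes to A's encoded list (four independent ifs)
def pvCode (s : String) : List Int :=
  (if s == "skip_connect" then [(0 : Int)] else []) ++
  (if s == "max_pool_3x3" then [1] else []) ++
  (if s == "sep_conv_3x3" then [2] else []) ++
  (if s == "sep_conv_5x5" then [3] else [])

lemma pvMid2 {v : Int} (xs ys zs : List Int) :
    (xs ++ (ys ++ (v :: zs))).Perm (v :: (xs ++ (ys ++ zs))) :=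
  (List.Perm.append_left xs List.perm_middle).trans List.perm_middle

lemma pvMid3 {v : Int} (ws xs ys zs : List Int) :
    (ws ++ (xs ++ (ys ++ (v :: zs)))).Perm (v :: (ws ++ (xs ++ (ys ++ zs)))) :=
  (List.Perm.append_left ws (pvMid2 xs ys zs)).trans List.perm_middle

lemma pvRep4_pairwise (a b c d : Nat) : (pvRep4 a b c d).Pairwise (· ≤ ·) := by
  simp [pvRep4, List.pairwise_append, List.pairwise_replicate, List.mem_replicate]
  constructor
  · rintro _ y (⟨_, rfl⟩ | ⟨_, rfl⟩) <;> norm_num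
  · rintro _ y (⟨_, rfl⟩ | ⟨_, rfl⟩ | ⟨_, rfl⟩) <;> norm_num

lemma pvFlatMap_perm (l : List String) :
    (pvRep4 (l.count "skip_connect") (l.count "max_pool_3x3")
            (l.count "sep_conv_3x3") (l.count "sep_conv_5x5")).Perm (l.flatMap pvCode) := by
  induction l with
  | nil => simp [pvRep4]
  | cons x xs ih =>
    simp only [List.flatMap_cons, List.count_cons]
    by_cases h0 : x = "skip_connect"
    · subst h0
      rw [show pvCode "skip_connect" = [(0:Int)] from by decide]
      norm_num
      simpa [pvRep4, List.replicate_succ] using (ih.cons 0)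
    · by_cases h1 : x = "max_pool_3x3"
      · subst h1
        rw [show pvCode "max_pool_3x3" = [(1:Int)] from by decide]
        norm_num [h0]
        refine List.Perm.trans ?_ (ih.cons 1)
        simp only [pvRep4, List.replicate_succ, List.append_assoc]
        exact List.perm_middle
      · by_cases h2 : x = "sep_conv_3x3"
        · subst h2
          rw [show pvCode "sep_conv_3x3" = [(2:Int)] from by decide]
          norm_num [h0, h1]
          refine List.Perm.trans ?_ (ih.cons 2)
          simp only [pvRep4, List.replicate_succ, List.append_assoc]
          exact pvMid2 _ _ _
        · by_cases h3 : x = "sep_conv_5x5"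
          · subst h3
            rw [show pvCode "sep_conv_5x5" = [(3:Int)] from by decide]
            norm_num [h0, h1, h2]
            refine List.Perm.trans ?_ (ih.cons 3)
            simp only [pvRep4, List.replicate_succ, List.append_assoc]
            exact pvMid3 _ _ _ _
          · rw [show pvCode x = [] from by simp [pvCode, h0, h1, h2, h3]]
            simpa [h0, h1, h2, h3] using ih

lemma pvB_counts (l : List String) (a b c d : Nat) :
    l.foldl
      (fun (cnt : Nat × Nat × Nat × Nat) t =>
        if t == "skip_connect" then (cnt.1 + 1, cnt.2.1, cnt.2.2.1, cnt.2.2.2)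
        else if t == "max_pool_3x3" then (cnt.1, cnt.2.1 + 1, cnt.2.2.1, cnt.2.2.2)
        else if t == "sep_conv_3x3" then (cnt.1, cnt.2.1, cnt.2.2.1 + 1, cnt.2.2.2)
        else if t == "sep_conv_5x5" then (cnt.1, cnt.2.1, cnt.2.2.1, cnt.2.2.2 + 1)
        else cnt) (a, b, c, d)
      = (a + l.count "skip_connect", b + l.count "max_pool_3x3",
         c + l.count "sep_conv_3x3", d + l.count "sep_conv_5x5") := by
  induction l generalizing a b c d with
  | nil => simp
  | cons x xs ih =>
    by_cases h0 : x = "skip_connect" <;> by_cases h1 : x = "max_pool_3x3" <;>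
      by_cases h2 : x = "sep_conv_3x3" <;> by_cases h3 : x = "sep_conv_5x5" <;>
      simp_all <;> omega

lemma pvA_step (l : List String) (acc : List Int) :
    l.foldl
      (fun acc s =>
        let acc := if s == "skip_connect" then acc ++ [(0 : Int)] else acc
        let acc := if s == "max_pool_3x3" then acc ++ [1] else acc
        let acc := if s == "sep_conv_3x3" then acc ++ [2] else acc
        let acc := if s == "sep_conv_5x5" then acc ++ [3] else acc
        acc) acc
    = acc ++ l.flatMap pvCode := by
  induction l generalizing acc with
  | nil => simp
  | cons x xs ih =>
    simp only [List.foldl_cons, List.flatMap_cons, ih, pvCode]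
    split_ifs <;> simp_all

lemma pvA_encoded (l : List String) :
    (PySem.List.pyRange 0 (PySem.List.len l) 1).foldl
      (fun acc i =>
        let s := PySem.List.pyGetD l i ""
        let acc := if s == "skip_connect" then acc ++ [(0 : Int)] else acc
        let acc := if s == "max_pool_3x3" then acc ++ [1] else acc
        let acc := if s == "sep_conv_3x3" then acc ++ [2] else acc
        let acc := if s == "sep_conv_5x5" then acc ++ [3] else acc
        acc) []
    = l.flatMap pvCode := by
  rw [PySem.List.foldl_pyRange_zero_pyGetD l ""
    (f := fun acc s =>
        let acc := if s == "skip_connect" then acc ++ [(0 : Int)] else acc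
        let acc := if s == "max_pool_3x3" then acc ++ [1] else acc
        let acc := if s == "sep_conv_3x3" then acc ++ [2] else acc
        let acc := if s == "sep_conv_5x5" then acc ++ [3] else acc
        acc) (init := [])]
  simpa using pvA_step l []

theorem layer_type_encoder_eq (l : List String) :
    layer_type_encoder l = layer_type_encoder_alt l := by
  unfold layer_type_encoder layer_type_encoder_alt
  rw [pvA_encoded, pvB_counts]
  simp only [Nat.zero_add]
  exact PySem.List.sorted_id_eq_of_perm_of_pairwise _ _ (pvFlatMap_perm l) (pvRep4_pairwise _ _ _ _)

-- ===== VERDICT (by name: the statement is the Claim_ definition above) =====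
theorem layer_type_encoder_spec : Claim_equal_layer_type_encoder := by
  intro l _
  exact layer_type_encoder_eq l
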